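-- pv_equiv track=rewrite | github.com/zhy0216/pigo | docs/reference/OpenViking/openviking/storage/local_fs.py | get_viking_rel_path_from_zip
-- ===== SOURCE A (Python) =====
-- def get_viking_rel_path_from_zip(zip_path: str) -> str:
--     """Restore Viking relative path from ZIP path, converting components starting with _._ back to ."""
--     # Remove root directory prefix (base_name/)
--     parts = zip_path.split("/")
--     if len(parts) <= 1:
--         return ""
--
--     # Remove first element (base_name)
--     rel_parts = parts[1:]
--     new_parts = []
--     for p in rel_parts:
--         if p.startswith("_._"):
--             new_parts.append("." + p[3:])
--         else:
--             new_parts.append(p)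
--
--     return "/".join(new_parts)
-- ===== SOURCE B (Python) =====
-- def get_viking_rel_path_from_zip(zip_path: str) -> str:
--     """Single-pass state machine: skip to the first '/', then copy characters,
--     rewriting '_._' to '.' only when it occurs at the start of a component."""
--     n = len(zip_path)
--     i = 0
--     while i < n and zip_path[i] != "/":
--         i += 1
--     if i == n:
--         return ""
--     out = []
--     j = i + 1
--     comp_start = True
--     while j < n:
--         if comp_start and zip_path[j:j + 3] == "_._":
--             out.append(".")
--             j += 3
--             comp_start = False
--         else:
--             c = zip_path[j]
--             out.append(c)
--             comp_start = c == "/"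
--             j += 1
--     return "".join(out)
-- ===== Notes on version B (the rewrite author's own statement) =====
-- stated objective: alternative
-- what changed: Replaces split('/') + per-component list building + '/'.join with a single left-to-right state-machine scan that skips to the first '/' and then copies characters, rewriting '_._' to '.' exactly at component starts; no part list is ever materialised (no speed claim).
import Mathlib
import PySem

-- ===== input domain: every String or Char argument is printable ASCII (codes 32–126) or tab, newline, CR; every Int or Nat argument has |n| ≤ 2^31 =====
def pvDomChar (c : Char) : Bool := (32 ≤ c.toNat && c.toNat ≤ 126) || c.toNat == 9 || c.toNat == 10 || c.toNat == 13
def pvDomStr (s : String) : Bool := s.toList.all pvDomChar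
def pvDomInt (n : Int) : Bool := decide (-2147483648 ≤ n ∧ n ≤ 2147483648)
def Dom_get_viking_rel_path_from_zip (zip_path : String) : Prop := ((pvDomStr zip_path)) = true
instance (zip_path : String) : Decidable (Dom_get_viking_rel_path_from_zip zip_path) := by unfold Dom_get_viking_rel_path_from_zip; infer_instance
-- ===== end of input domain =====

-- B replaces A's split/transform/join pipeline with a single-pass state-machine scan (alternative decomposition; no speed claim).

-- ===== PORT A =====
def get_viking_rel_path_from_zip (zip_path : String) : String :=
  match PySem.Chars.split? zip_path.toList ['/'] with
  | none => ""  -- unreachable: the separator "/" is nonempty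
  | some parts =>
    if parts.length ≤ 1 then ""
    else
      let rel_parts := PySem.List.slice parts (some 1) none
      let new_parts := rel_parts.foldl
        (fun acc p =>
          if PySem.Chars.startswith p ['_', '.', '_'] then
            acc ++ ['.' :: PySem.Chars.slice p (some 3) none]
          else acc ++ [p]) []
      String.ofList (PySem.Chars.join ['/'] new_parts)

-- ===== PORT B =====
-- B's first while-loop: advance to the first '/' (none if there is no '/').
def pvStripB : List Char → Option (List Char)
  | [] => none
  | c :: t => if c = '/' then some t else pvStripB t

-- B's second while-loop: copy characters; at a component start a literal '_._' becomes '.'.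
def pvFixB : Bool → List Char → List Char
  | _, [] => []
  | compStart, c :: t =>
    if compStart && List.isPrefixOf ['_', '.', '_'] (c :: t) then
      '.' :: pvFixB false ((c :: t).drop 3)
    else
      c :: pvFixB (c == '/') t
termination_by _ l => l.length
decreasing_by
  all_goals simp

def get_viking_rel_path_from_zip_alt (zip_path : String) : String :=
  match pvStripB zip_path.toList with
  | none => ""
  | some rest => String.ofList (pvFixB true rest)

-- ===== PRECONDITION & SPEC =====
def Spec_get_viking_rel_path_from_zip (zip_path : String) (out : String) : Prop := out = get_viking_rel_path_from_zip_alt zip_path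
instance (zip_path : String) (out : String) : Decidable (Spec_get_viking_rel_path_from_zip zip_path out) := by unfold Spec_get_viking_rel_path_from_zip; infer_instance

-- ===== CLAIM (what is proved, stated in full; the proofs are below) =====
def Claim_equal_get_viking_rel_path_from_zip : Prop := ∀ (zip_path : String), Dom_get_viking_rel_path_from_zip zip_path → Spec_get_viking_rel_path_from_zip zip_path (get_viking_rel_path_from_zip zip_path)

-- ===== LEMMAS AND PROOFS =====

-- Reference split on '/' (structural recursion), used to relate the two ports.
def pvSplitSl : List Char → List (List Char)
  | [] => [[]]
  | c :: t =>
    if c = '/' then [] :: pvSplitSl t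
    else
      match pvSplitSl t with
      | [] => [[c]]  -- unreachable
      | p :: ps => (c :: p) :: ps

-- A's per-component transformation.
def pvF (p : List Char) : List Char :=
  if List.isPrefixOf ['_', '.', '_'] p then '.' :: p.drop 3 else p

-- Reference join with '/'.
def pvJn : List (List Char) → List Char
  | [] => []
  | [p] => p
  | p :: q :: ps => p ++ '/' :: pvJn (q :: ps)

theorem pvHeadITail {α : Type} [Inhabited α] (ps : List α) (h : ps ≠ []) :
    ps.headI :: ps.tail = ps := by
  cases ps with
  | nil => exact absurd rfl h
  | cons p qs => simp

theorem pvSplitSl_ne_nil (l : List Char) : pvSplitSl l ≠ [] := by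
  cases l with
  | nil => simp [pvSplitSl]
  | cons c t =>
    simp only [pvSplitSl]
    split
    · simp
    · cases h : pvSplitSl t <;> simp

theorem pvSplitSl_cons_ne (c : Char) (t : List Char) (hc : c ≠ '/') :
    pvSplitSl (c :: t) = (c :: (pvSplitSl t).headI) :: (pvSplitSl t).tail := by
  simp only [pvSplitSl, if_neg hc]
  cases h : pvSplitSl t with
  | nil => exact absurd h (pvSplitSl_ne_nil t)
  | cons p ps => simp

theorem pvSplitSl_headI_prefix (t : List Char) : ∃ z, t = (pvSplitSl t).headI ++ z := by
  induction t with
  | nil => exact ⟨[], by simp [pvSplitSl]⟩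
  | cons c t ih =>
    by_cases hc : c = '/'
    · exact ⟨c :: t, by simp [pvSplitSl, hc]⟩
    · obtain ⟨z, hz⟩ := ih
      refine ⟨z, ?_⟩
      rw [pvSplitSl_cons_ne c t hc]
      simpa using hz

theorem pvJn_cons_head (x : Char) (p : List Char) (ps : List (List Char)) :
    pvJn ((x :: p) :: ps) = x :: pvJn (p :: ps) := by
  cases ps <;> simp [pvJn]

theorem pvJn_nil_cons (ps : List (List Char)) (h : ps ≠ []) :
    pvJn ([] :: ps) = '/' :: pvJn ps := by
  cases ps with
  | nil => exact absurd rfl h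
  | cons q qs => simp [pvJn]

theorem pvJoin_eq_pvJn (ps : List (List Char)) : PySem.Chars.join ['/'] ps = pvJn ps := by
  induction ps with
  | nil => simp [pvJn, PySem.Chars.join_nil]
  | cons p qs ih =>
    cases qs with
    | nil => simp [pvJn, PySem.Chars.join_singleton]
    | cons q rs =>
      rw [PySem.Chars.join_cons_cons]
      simp [pvJn, ih]

theorem pvGo_spec (fuel : Nat) :
    ∀ (l cur : List Char) (acc : List (List Char)), l.length ≤ fuel →
      PySem.Chars.splitOn.go ['/'] fuel l cur acc =
        acc.reverse ++ (cur.reverse ++ (pvSplitSl l).headI) :: (pvSplitSl l).tail := by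
  induction fuel with
  | zero =>
    intro l cur acc hl
    have : l = [] := List.length_eq_zero_iff.mp (Nat.le_zero.mp hl)
    subst this
    simp [PySem.Chars.splitOn.go, pvSplitSl]
  | succ n ih =>
    intro l cur acc hl
    cases l with
    | nil => simp [PySem.Chars.splitOn.go, pvSplitSl]
    | cons c t =>
      by_cases hc : c = '/'
      · subst hc
        have hpre : List.isPrefixOf ['/'] ('/' :: t) = true := by simp [List.isPrefixOf]
        rw [PySem.Chars.splitOn.go, if_pos hpre]
        have ht : t.length ≤ n := by simpa using hl
        rw [show List.drop (['/'] : List Char).length ('/' :: t) = t by simp]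
        rw [ih t [] (List.reverse cur :: acc) ht]
        simp [pvSplitSl]
        rw [pvHeadITail _ (pvSplitSl_ne_nil t)]
      · have hpre : List.isPrefixOf ['/'] (c :: t) = false := by
          simp [List.isPrefixOf]
          exact fun h => absurd h.symm hc
        rw [PySem.Chars.splitOn.go, if_neg (by simp [hpre])]
        have ht : t.length ≤ n := by simpa using Nat.le_of_succ_le_succ (by simpa using hl)
        rw [ih t (c :: cur) acc ht]
        rw [pvSplitSl_cons_ne c t hc]
        simp

theorem pvSplitOn_eq (l : List Char) : PySem.Chars.splitOn l ['/'] = pvSplitSl l := by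
  unfold PySem.Chars.splitOn
  rw [pvGo_spec (l.length + 1) l [] [] (by omega)]
  cases h : pvSplitSl l with
  | nil => exact absurd h (pvSplitSl_ne_nil l)
  | cons p ps => simp

theorem pvStripB_none (l : List Char) (h : pvStripB l = none) : pvSplitSl l = [l] := by
  induction l with
  | nil => simp [pvSplitSl]
  | cons c t ih =>
    by_cases hc : c = '/'
    · simp [pvStripB, hc] at h
    · have ht : pvStripB t = none := by simpa [pvStripB, hc] using h
      rw [pvSplitSl_cons_ne c t hc, ih ht]
      simp

theorem pvStripB_some (l r : List Char) (h : pvStripB l = some r) :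
    ∃ p, pvSplitSl l = p :: pvSplitSl r := by
  induction l with
  | nil => simp [pvStripB] at h
  | cons c t ih =>
    by_cases hc : c = '/'
    · have : t = r := by simpa [pvStripB, hc] using h
      subst this
      exact ⟨[], by simp [pvSplitSl, hc]⟩
    · have ht : pvStripB t = some r := by simpa [pvStripB, hc] using h
      obtain ⟨p, hp⟩ := ih ht
      refine ⟨c :: p, ?_⟩
      rw [pvSplitSl_cons_ne c t hc, hp]
      simp

theorem pvFixB_spec (n : Nat) :
    ∀ l : List Char, l.length ≤ n →
      pvFixB true l = pvJn ((pvSplitSl l).map pvF) ∧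
      pvFixB false l = pvJn ((pvSplitSl l).headI :: (pvSplitSl l).tail.map pvF) := by
  induction n with
  | zero =>
    intro l hl
    have : l = [] := List.length_eq_zero_iff.mp (Nat.le_zero.mp hl)
    subst this
    constructor <;> simp [pvFixB, pvSplitSl, pvF, pvJn, List.isPrefixOf]
  | succ n ih =>
    intro l hl
    cases l with
    | nil => constructor <;> simp [pvFixB, pvSplitSl, pvF, pvJn, List.isPrefixOf]
    | cons c t =>
      constructor
      · -- compStart = true
        by_cases hp : List.isPrefixOf ['_', '.', '_'] (c :: t) = true
        · -- l = '_' :: '.' :: '_' :: r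
          have hshape : c = '_' ∧ ∃ r, t = '.' :: '_' :: r := by
            cases t with
            | nil => simp [List.isPrefixOf] at hp
            | cons d u =>
              cases u with
              | nil => simp [List.isPrefixOf] at hp
              | cons e v =>
                simp [List.isPrefixOf] at hp
                exact ⟨hp.1.symm, v, by rw [← hp.2.1, ← hp.2.2]⟩
          obtain ⟨hc, r, ht⟩ := hshape
          subst hc; subst ht
          rw [pvFixB, if_pos (by simpa using hp)]
          have hr : r.length ≤ n := by simp at hl; omega
          have hF := (ih r hr).2
          rw [List.drop_succ_cons, List.drop_succ_cons, List.drop_succ_cons, List.drop_zero]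
          rw [hF]
          rw [pvSplitSl_cons_ne '_' ('.' :: '_' :: r) (by decide),
              pvSplitSl_cons_ne '.' ('_' :: r) (by decide),
              pvSplitSl_cons_ne '_' r (by decide)]
          cases hh : pvSplitSl r with
          | nil => exact absurd hh (pvSplitSl_ne_nil r)
          | cons h0 tl0 =>
            simp only [List.headI, List.tail, List.map]
            rw [show pvF ('_' :: '.' :: '_' :: h0) = '.' :: h0 by
                  simp [pvF, List.isPrefixOf]]
            rw [pvJn_cons_head]
        · rw [pvFixB, if_neg (by simp [hp])]
          by_cases hc : c = '/'
          · subst hc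
            have ht : t.length ≤ n := by simpa using hl
            have hT := (ih t ht).1
            rw [show (('/' : Char) == '/') = true by rfl]
            rw [hT]
            rw [show pvSplitSl ('/' :: t) = [] :: pvSplitSl t by simp [pvSplitSl]]
            rw [List.map_cons]
            rw [show pvF [] = [] by simp [pvF, List.isPrefixOf]]
            rw [pvJn_nil_cons _ (by
              intro hnil
              exact pvSplitSl_ne_nil t (List.map_eq_nil_iff.mp hnil))]
          · have ht : t.length ≤ n := by simpa using Nat.le_of_succ_le_succ (by simpa using hl)
            have hF := (ih t ht).2
            rw [show (c == '/') = false by simp [hc]]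
            rw [hF]
            rw [pvSplitSl_cons_ne c t hc]
            rw [List.map_cons]
            have hhead : pvF (c :: (pvSplitSl t).headI) = c :: (pvSplitSl t).headI := by
              unfold pvF
              rw [if_neg]
              intro hpre
              apply hp
              obtain ⟨z, hz⟩ := pvSplitSl_headI_prefix t
              have h1 : ['_', '.', '_'] <+: (c :: (pvSplitSl t).headI) :=
                List.isPrefixOf_iff_prefix.mp hpre
              have h2 : (c :: (pvSplitSl t).headI) <+: (c :: t) :=
                ⟨z, by rw [List.cons_append, hz.symm]⟩
              exact List.isPrefixOf_iff_prefix.mpr (h1.trans h2)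
            rw [hhead, pvJn_cons_head]
      · -- compStart = false
        rw [pvFixB]
        rw [show (false && List.isPrefixOf ['_', '.', '_'] (c :: t)) = false by simp]
        rw [if_neg (by simp)]
        by_cases hc : c = '/'
        · subst hc
          have ht : t.length ≤ n := by simpa using hl
          have hT := (ih t ht).1
          rw [show (('/' : Char) == '/') = true by rfl, hT]
          rw [show pvSplitSl ('/' :: t) = [] :: pvSplitSl t by simp [pvSplitSl]]
          simp only [List.headI, List.tail]
          rw [pvJn_nil_cons _ (by
            intro hnil
            exact pvSplitSl_ne_nil t (List.map_eq_nil_iff.mp hnil))]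
        · have ht : t.length ≤ n := by simpa using Nat.le_of_succ_le_succ (by simpa using hl)
          have hF := (ih t ht).2
          rw [show (c == '/') = false by simp [hc], hF]
          rw [pvSplitSl_cons_ne c t hc]
          simp only [List.headI, List.tail]
          rw [pvJn_cons_head]

theorem pvFoldl_map (xs : List (List Char)) :
    ∀ acc, xs.foldl
        (fun acc p =>
          if PySem.Chars.startswith p ['_', '.', '_'] then
            acc ++ ['.' :: PySem.Chars.slice p (some 3) none]
          else acc ++ [p]) acc = acc ++ xs.map pvF := by
  induction xs with
  | nil => intro acc; simp
  | cons p ps ih =>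
    intro acc
    rw [List.foldl_cons, List.map_cons, ih]
    have hslice : PySem.List.slice p (some 3) none = p.drop 3 := by
      rw [show ((3 : Int)) = ((3 : Nat) : Int) by norm_num, PySem.List.slice_from_natCast]
    by_cases h : List.isPrefixOf ['_', '.', '_'] p = true
    · simp [PySem.Chars.startswith, PySem.Chars.slice, h, pvF, hslice]
    · simp [PySem.Chars.startswith, h, pvF]

-- ===== VERDICT (by name: the statement is the Claim_ definition above) =====
theorem get_viking_rel_path_from_zip_spec : Claim_equal_get_viking_rel_path_from_zip := by
  intro zip_path _
  unfold Spec_get_viking_rel_path_from_zip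
  unfold get_viking_rel_path_from_zip get_viking_rel_path_from_zip_alt
  rw [show PySem.Chars.split? zip_path.toList ['/'] = some (pvSplitSl zip_path.toList) by
        simp [PySem.Chars.split?, pvSplitOn_eq]]
  cases hs : pvStripB zip_path.toList with
  | none =>
    have h1 : pvSplitSl zip_path.toList = [zip_path.toList] := pvStripB_none _ hs
    simp [h1]
  | some r =>
    obtain ⟨p, hp⟩ := pvStripB_some _ r hs
    have hlen : ¬ (pvSplitSl zip_path.toList).length ≤ 1 := by
      rw [hp]
      have := pvSplitSl_ne_nil r
      cases h : pvSplitSl r with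
      | nil => exact absurd h this
      | cons q qs => simp [h]
    simp only [hlen, if_false]
    rw [hp]
    rw [show PySem.List.slice (p :: pvSplitSl r) (some 1) none = pvSplitSl r by
          rw [show ((1 : Int)) = ((1 : Nat) : Int) by norm_num, PySem.List.slice_from_natCast]
          simp]
    rw [pvFoldl_map (pvSplitSl r) []]
    rw [List.nil_append, pvJoin_eq_pvJn]
    rw [(pvFixB_spec r.length r le_rfl).1]
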